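-- pv_equiv track=rewrite | github.com/P4runpro/P4runpro | control_plane/utils.py | get_supportive_reg
-- ===== SOURCE A (Python) =====
-- def get_supportive_reg(reg_name_ls):
--     all = ["har", "sar", "mar"]
--     for reg in reg_name_ls:
--         if reg in all:
--             all.remove(reg)
--     if all:
--         return all[0]
--     return None
-- ===== SOURCE B (Python) =====
-- def get_supportive_reg(reg_name_ls):
--     used = set(reg_name_ls)
--     for reg in ["har", "sar", "mar"]:
--         if reg not in used:
--             return reg
--     return None
-- ===== Notes on version B (the rewrite author's own statement) =====
-- stated objective: idiomatic
-- what changed: Inverted the traversal: instead of iterating the input and removing matches from a mutable candidate list, B builds a set of used names once and returns the first of the fixed candidates not in it.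
import Mathlib
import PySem

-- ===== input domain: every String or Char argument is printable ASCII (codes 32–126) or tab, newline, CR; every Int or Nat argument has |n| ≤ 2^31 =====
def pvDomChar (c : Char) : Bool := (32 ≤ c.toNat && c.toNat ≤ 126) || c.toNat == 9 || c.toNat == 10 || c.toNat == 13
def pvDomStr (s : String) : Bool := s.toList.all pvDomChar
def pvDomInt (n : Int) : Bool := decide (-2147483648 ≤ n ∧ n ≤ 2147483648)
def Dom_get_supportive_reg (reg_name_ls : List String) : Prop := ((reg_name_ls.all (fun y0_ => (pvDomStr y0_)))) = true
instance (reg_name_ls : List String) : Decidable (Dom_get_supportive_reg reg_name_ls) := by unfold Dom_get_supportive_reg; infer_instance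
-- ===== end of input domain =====

-- B builds the set of used names once and returns the first fixed candidate not in it,
-- instead of A's removal from a mutable candidate list while scanning the input (idiomatic).

-- ===== PORT A =====
def get_supportive_reg (reg_name_ls : List String) : Option String :=
  let all : List String :=
    reg_name_ls.foldl
      (fun all reg =>
        if all.contains reg then (PySem.List.remove? all reg).getD all else all)
      ["har", "sar", "mar"]
  all.head?

-- ===== PORT B =====
def get_supportive_reg_alt (reg_name_ls : List String) : Option String :=
  let used : PySem.Set String := PySem.Set.ofList reg_name_ls
  ["har", "sar", "mar"].find? (fun reg => !(PySem.Set.contains used reg))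

-- ===== PRECONDITION & SPEC =====
def Spec_get_supportive_reg (reg_name_ls : List String) (out : Option String) : Prop := out = get_supportive_reg_alt reg_name_ls
instance (reg_name_ls : List String) (out : Option String) : Decidable (Spec_get_supportive_reg reg_name_ls out) := by unfold Spec_get_supportive_reg; infer_instance

-- ===== CLAIM (what is proved, stated in full; the proofs are below) =====
def Claim_equal_get_supportive_reg : Prop := ∀ (reg_name_ls : List String), Dom_get_supportive_reg reg_name_ls → Spec_get_supportive_reg reg_name_ls (get_supportive_reg reg_name_ls)

-- ===== LEMMAS AND PROOFS =====

-- One step of A's loop, on a duplicate-free state, is a filter.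
theorem pv_step_eq_filter (s : List String) (x : String) (h : s.Nodup) :
    (if s.contains x then (PySem.List.remove? s x).getD s else s)
      = s.filter (fun y => y ≠ x) := by
  by_cases hx : x ∈ s
  · rw [if_pos (by simpa using hx), PySem.List.remove?_eq_some_erase s x hx]
    rw [Option.getD_some, List.Nodup.erase_eq_filter h x]
    refine List.filter_congr (fun y _ => ?_)
    simp [bne, Bool.beq_eq_decide_eq]
  · rw [if_neg (by simpa using hx)]
    exact (List.filter_eq_self.2 (fun y hy => by
      simp only [decide_eq_true_eq]
      rintro rfl; exact hx hy)).symm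

-- A's loop computes: initial candidates filtered by "does not occur in the input".
theorem pv_fold_eq_filter (l : List String) (s : List String) (h : s.Nodup) :
    l.foldl
      (fun all reg =>
        if all.contains reg then (PySem.List.remove? all reg).getD all else all) s
      = s.filter (fun r => !(l.contains r)) := by
  induction l generalizing s with
  | nil => simp
  | cons x l ih =>
    rw [List.foldl_cons, pv_step_eq_filter s x h, ih _ (List.Nodup.filter _ h),
        List.filter_filter]
    refine List.filter_congr (fun r _ => ?_)
    by_cases hrx : r = x <;> simp [hrx]

theorem get_supportive_reg_spec' (l : List String) :
    get_supportive_reg l = get_supportive_reg_alt l := by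
  unfold get_supportive_reg get_supportive_reg_alt
  rw [pv_fold_eq_filter l _ (by decide), List.head?_filter]
  have hp : (fun reg => !(PySem.Set.contains (PySem.Set.ofList l) reg))
      = (fun r : String => !(l.contains r)) := by
    funext r
    have : (PySem.Set.ofList l).contains r = l.contains r := by
      by_cases hr : r ∈ l <;>
        simp [PySem.Set.contains, PySem.Set.mem_ofList, hr]
    simp only [this]
  simp only [hp]

-- ===== VERDICT (by name: the statement is the Claim_ definition above) =====
theorem get_supportive_reg_spec : Claim_equal_get_supportive_reg := by
  intro l _
  exact get_supportive_reg_spec' l
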